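-- pv_equiv track=rewrite | github.com/MarcYin/edown | src/edown/utils.py | split_csv_values
-- ===== SOURCE A (Python) =====
-- from collections.abc import Iterable, Mapping, Sequence
--
-- def split_csv_values(values: Iterable[str]) -> tuple[str, ...]:
--     items = []
--     for value in values:
--         for chunk in value.split(","):
--             stripped = chunk.strip()
--             if stripped:
--                 items.append(stripped)
--     return tuple(items)
-- ===== SOURCE B (Python) =====
-- def split_csv_values(values):
--     # character-level scanner: one pass over each value's characters, no split/strip
--     items = []
--     for value in values:
--         cur = []    # characters of the token being built (starts and ends non-space)
--         pend = []   # whitespace seen after cur, kept only if more token chars follow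
--         for ch in value:
--             if ch == ",":
--                 if cur:
--                     items.append("".join(cur))
--                 cur = []
--                 pend = []
--             elif ch.isspace():
--                 if cur:
--                     pend.append(ch)
--             else:
--                 cur.extend(pend)
--                 cur.append(ch)
--                 pend = []
--         if cur:
--             items.append("".join(cur))
--     return tuple(items)
-- ===== Notes on version B (the rewrite author's own statement) =====
-- stated objective: alternative
-- what changed: B replaces A's split(',')/strip()/filter pipeline with a hand-written character-level scanner: a single pass over each value's characters with a current-token buffer and a pending-whitespace buffer, flushing tokens at commas and end of value, so no intermediate substring lists are ever built.
import Mathlib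
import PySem

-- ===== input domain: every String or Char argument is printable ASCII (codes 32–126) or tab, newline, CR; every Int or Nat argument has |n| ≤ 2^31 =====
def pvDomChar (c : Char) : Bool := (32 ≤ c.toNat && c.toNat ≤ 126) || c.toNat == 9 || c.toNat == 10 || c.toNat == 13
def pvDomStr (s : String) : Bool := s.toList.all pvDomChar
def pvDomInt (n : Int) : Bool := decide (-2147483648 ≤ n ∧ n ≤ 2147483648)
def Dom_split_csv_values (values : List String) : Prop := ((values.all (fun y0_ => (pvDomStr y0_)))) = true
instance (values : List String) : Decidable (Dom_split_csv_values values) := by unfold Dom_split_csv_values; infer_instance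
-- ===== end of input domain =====

-- B replaces A's split/strip/filter pipeline with a character-level scanner (token buffer + pending-whitespace buffer); objective: alternative.


-- ===== PORT A =====
-- value.split(",") has a non-empty literal separator, so Str.split? is always `some`; `.getD []` is unreachable.
def split_csv_values (values : List String) : List String :=
  values.foldl (fun items value =>
    ((PySem.Str.split? value ",").getD []).foldl (fun items chunk =>
      let stripped := PySem.Str.strip chunk
      if stripped ≠ "" then items ++ [stripped] else items) items) []

-- ===== PORT B =====
-- scanner step for one character: state = (items, cur, pend); transliterates Source B's inner loop body
def pvScanStep (s : List String × List Char × List Char) (ch : Char) :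
    List String × List Char × List Char :=
  let items := s.1
  let cur := s.2.1
  let pend := s.2.2
  if ch = ',' then
    ((if cur ≠ [] then items ++ [String.ofList cur] else items), [], [])
  else if PySem.Chars.isspace ch then
    (items, cur, if cur ≠ [] then pend ++ [ch] else pend)
  else
    (items, cur ++ pend ++ [ch], [])

def split_csv_values_alt (values : List String) : List String :=
  values.foldl (fun items value =>
    let st := value.toList.foldl pvScanStep (items, [], [])
    if st.2.1 ≠ [] then st.1 ++ [String.ofList st.2.1] else st.1) []

-- ===== PRECONDITION & SPEC =====
def Spec_split_csv_values (values : List String) (out : List String) : Prop := out = split_csv_values_alt values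
instance (values : List String) (out : List String) : Decidable (Spec_split_csv_values values out) := by unfold Spec_split_csv_values; infer_instance

-- ===== CLAIM (what is proved, stated in full; the proofs are below) =====
def Claim_equal_split_csv_values : Prop := ∀ (values : List String), Dom_split_csv_values values → Spec_split_csv_values values (split_csv_values values)

-- ===== LEMMAS AND PROOFS =====

theorem pv_modifyHead_id {α : Type} (l : List α) : l.modifyHead (fun c => c) = l := by
  cases l <;> rfl

theorem pv_go_spec (c : Char) : ∀ (fuel : Nat) (l cur : List Char) (acc : List (List Char)),
    l.length < fuel →
    PySem.Chars.splitOn.go [c] fuel l cur acc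
      = acc.reverse ++ (List.splitOnP (· == c) l).modifyHead (cur.reverse ++ ·) := by
  intro fuel
  induction fuel with
  | zero => intro l cur acc h; omega
  | succ f ih =>
    intro l cur acc h
    cases l with
    | nil => simp [PySem.Chars.splitOn.go, List.splitOnP_nil]
    | cons x rest =>
      rw [PySem.Chars.splitOn.go]
      by_cases hx : x = c
      · subst hx
        rw [if_pos (by simp)]
        simp only [List.length_cons, List.length_nil, List.drop_succ_cons, List.drop_zero]
        rw [ih rest [] (cur.reverse :: acc) (by simp at h; omega)]
        simp [List.splitOnP_cons, pv_modifyHead_id]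
      · rw [if_neg (by simp [List.isPrefixOf, Ne.symm hx])]
        rw [ih rest (x :: cur) acc (by simp at h; omega)]
        rw [List.splitOnP_cons, if_neg (by simp [hx])]
        cases hrest : List.splitOnP (· == c) rest with
        | nil => simp
        | cons hd tl => simp

theorem pv_splitOn_comma (s : List Char) :
    PySem.Chars.splitOn s [','] = List.splitOnP (· == ',') s := by
  unfold PySem.Chars.splitOn
  rw [pv_go_spec ',' (s.length + 1) s [] [] (by omega)]
  cases h : List.splitOnP (· == ',') s with
  | nil => simp
  | cons hd tl => simp

-- split? with the literal separator "," computed through Chars.splitOn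
theorem pv_split_comma (s : String) :
    (PySem.Str.split? s ",").getD []
      = (List.splitOnP (· == ',') s.toList).map String.ofList := by
  simp [PySem.Str.split?, PySem.Chars.split?, pv_splitOn_comma]

-- A as a flatMap of the per-value strip-and-filter
theorem pv_A_eq (values : List String) :
    split_csv_values values
      = values.flatMap (fun v =>
          (((PySem.Str.split? v ",").getD []).map (fun c => PySem.Str.strip c)).filter
            (fun s => decide (s ≠ ""))) := by
  have hstep : ∀ (acc : List String) (v : String),
      ((PySem.Str.split? v ",").getD []).foldl (fun items chunk =>
        let stripped := PySem.Str.strip chunk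
        if stripped ≠ "" then items ++ [stripped] else items) acc
      = acc ++ (((PySem.Str.split? v ",").getD []).map (fun c => PySem.Str.strip c)).filter
          (fun s => decide (s ≠ "")) := by
    intro acc v
    have hfun : (fun (items : List String) (chunk : String) =>
        let stripped := PySem.Str.strip chunk
        if stripped ≠ "" then items ++ [stripped] else items)
      = (fun items chunk =>
          if (fun c => decide (PySem.Str.strip c ≠ "")) chunk = true
          then items ++ [PySem.Str.strip chunk] else items) := by
      funext items chunk
      by_cases hch : PySem.Str.strip chunk = "" <;> simp [hch]
    rw [hfun, PySem.List.foldl_append_if, List.filter_map]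
    simp [Function.comp_def]
  suffices h : ∀ (acc : List String),
      List.foldl (fun items value =>
        ((PySem.Str.split? value ",").getD []).foldl (fun items chunk =>
          let stripped := PySem.Str.strip chunk
          if stripped ≠ "" then items ++ [stripped] else items) items) acc values
      = acc ++ values.flatMap (fun v =>
          (((PySem.Str.split? v ",").getD []).map (fun c => PySem.Str.strip c)).filter
            (fun s => decide (s ≠ ""))) by
    have := h []
    simpa [split_csv_values] using this
  induction values with
  | nil => intro acc; simp
  | cons v vs ih =>
    intro acc
    rw [List.foldl_cons, hstep, ih, List.flatMap_cons, List.append_assoc]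

-- strip lemmas
theorem pv_lstrip_ws_append (as bs : List Char) (h : as.all PySem.Chars.isspace) :
    PySem.Chars.lstrip (as ++ bs) = PySem.Chars.lstrip bs := by
  induction as with
  | nil => rfl
  | cons a as ih =>
    simp only [List.all_cons, Bool.and_eq_true] at h
    simp [PySem.Chars.lstrip, h.1]
    exact ih h.2

theorem pv_strip_ws_append (as bs : List Char) (h : as.all PySem.Chars.isspace) :
    PySem.Chars.strip (as ++ bs) = PySem.Chars.strip bs := by
  simp [PySem.Chars.strip, pv_lstrip_ws_append as bs h]

theorem pv_rstrip_append_ws (as bs : List Char) (h : bs.all PySem.Chars.isspace) :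
    PySem.Chars.rstrip (as ++ bs) = PySem.Chars.rstrip as := by
  simp only [PySem.Chars.rstrip, List.reverse_append]
  congr 1
  induction bs using List.reverseRecOn with
  | nil => rfl
  | append_singleton bs b ih =>
    simp only [List.all_append, List.all_cons, List.all_nil, Bool.and_eq_true] at h
    simp [List.dropWhile_cons, h.2.1]
    exact ih h.1

theorem pv_strip_clean_ws (cur pend : List Char)
    (hl : PySem.Chars.lstrip cur = cur) (hr : PySem.Chars.rstrip cur = cur)
    (hp : pend.all PySem.Chars.isspace) :
    PySem.Chars.strip (cur ++ pend) = cur := by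
  cases cur with
  | nil => simpa using pv_strip_ws_append pend [] (by simpa using hp)
  | cons a l =>
    have ha : PySem.Chars.isspace a = false := by
      by_contra hcontra
      have : PySem.Chars.isspace a = true := by
        cases h : PySem.Chars.isspace a
        · exact absurd h hcontra
        · rfl
      simp [PySem.Chars.lstrip, List.dropWhile_cons, this] at hl
      have := congrArg List.length hl
      simp at this
      have := List.length_dropWhile_le PySem.Chars.isspace l
      omega
    have hls : PySem.Chars.lstrip ((a :: l) ++ pend) = (a :: l) ++ pend := by
      simp [PySem.Chars.lstrip, List.dropWhile_cons, ha]
    simp only [PySem.Chars.strip, hls]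
    rw [pv_rstrip_append_ws (a :: l) pend hp, hr]

-- the scanner invariant: running the scan over l and flushing equals
-- items ++ the stripped, non-empty chunks of l (first chunk prefixed by cur ++ pend)
theorem pv_scan (l : List Char) : ∀ (items : List String) (cur pend : List Char),
    PySem.Chars.lstrip cur = cur → PySem.Chars.rstrip cur = cur →
    pend.all PySem.Chars.isspace → (cur = [] → pend = []) →
    (let st := l.foldl pvScanStep (items, cur, pend);
     if st.2.1 ≠ [] then st.1 ++ [String.ofList st.2.1] else st.1)
      = items ++ (((List.splitOnP (· == ',') l).modifyHead (fun c => cur ++ pend ++ c)).map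
          (fun c => String.ofList (PySem.Chars.strip c))).filter (fun s => decide (s ≠ "")) := by
  induction l with
  | nil =>
    intro items cur pend hl hr hp h0
    simp only [List.foldl_nil, List.splitOnP_nil, List.modifyHead, List.map, List.filter,
      List.append_nil]
    rw [pv_strip_clean_ws cur pend hl hr hp]
    by_cases hc : cur = []
    · subst hc; simp
    · simp only [hc, ne_eq, not_false_eq_true, if_pos]
      have : ¬ (String.ofList cur = "") := by
        intro h
        apply hc
        have := congrArg String.toList h
        simpa using this
      simp [this]
  | cons x rest ih =>
    intro items cur pend hl hr hp h0
    by_cases hx : x = ','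
    · subst hx
      have hstep : pvScanStep (items, cur, pend) ',' =
          ((if cur ≠ [] then items ++ [String.ofList cur] else items), [], []) := by
        simp [pvScanStep]
      rw [List.foldl_cons, hstep,
        ih _ [] [] rfl rfl (by simp) (fun _ => rfl)]
      rw [List.splitOnP_cons]
      simp only [beq_self_eq_true, if_pos]
      simp only [List.modifyHead, List.map_cons, List.filter_cons, List.nil_append,
        List.append_nil]
      rw [pv_strip_clean_ws cur pend hl hr hp]
      by_cases hc : cur = []
      · subst hc
        cases hsp : List.splitOnP (· == ',') rest with
        | nil => simp
        | cons hd tl => simp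
      · have hne : ¬ (String.ofList cur = "") := by
          intro h
          apply hc
          have := congrArg String.toList h
          simpa using this
        cases hsp : List.splitOnP (· == ',') rest with
        | nil => simp [hc, hne]
        | cons hd tl => simp [hc, hne]
    · by_cases hws : PySem.Chars.isspace x = true
      · by_cases hc : cur = []
        · have hp0 : pend = [] := h0 hc
          subst hc hp0
          have hstep : pvScanStep (items, [], []) x = (items, [], []) := by
            simp [pvScanStep, hx, hws]
          rw [List.foldl_cons, hstep, ih items [] [] rfl rfl (by simp) (fun _ => rfl)]
          rw [List.splitOnP_cons, if_neg (by simp [hx])]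
          congr 1
          rw [List.modifyHead_modifyHead]
          cases hrest : List.splitOnP (· == ',') rest with
          | nil => simp
          | cons hd tl =>
            simp only [List.modifyHead, Function.comp, List.nil_append, List.map_cons]
            have : PySem.Chars.strip (x :: hd) = PySem.Chars.strip hd := by
              simpa using pv_strip_ws_append [x] hd (by simp [hws])
            rw [this]
        · have hstep : pvScanStep (items, cur, pend) x = (items, cur, pend ++ [x]) := by
            simp [pvScanStep, hx, hws, hc]
          rw [List.foldl_cons, hstep,
            ih items cur (pend ++ [x]) hl hr (by simp_all) (fun h => absurd h hc)]
          rw [List.splitOnP_cons, if_neg (by simp [hx])]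
          congr 1
          rw [List.modifyHead_modifyHead]
          cases hrest : List.splitOnP (· == ',') rest with
          | nil => simp
          | cons hd tl => simp [Function.comp]
      · -- ordinary character: cur grows to cur ++ pend ++ [x], stays clean
        have hstep : pvScanStep (items, cur, pend) x = (items, cur ++ pend ++ [x], []) := by
          simp [pvScanStep, hx, hws]
        have hxf : PySem.Chars.isspace x = false := by
          cases h : PySem.Chars.isspace x
          · rfl
          · exact absurd h hws
        have hl' : PySem.Chars.lstrip (cur ++ pend ++ [x]) = cur ++ pend ++ [x] := by
          cases hc : cur with
          | nil =>
            have hp0 : pend = [] := h0 hc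
            subst hp0
            simp [PySem.Chars.lstrip, List.dropWhile_cons, hxf]
          | cons a l =>
            have ha : PySem.Chars.isspace a = false := by
              by_contra hcontra
              have hat : PySem.Chars.isspace a = true := by
                cases h : PySem.Chars.isspace a
                · exact absurd h hcontra
                · rfl
              rw [hc] at hl
              simp [PySem.Chars.lstrip, List.dropWhile_cons, hat] at hl
              have := congrArg List.length hl
              simp at this
              have := List.length_dropWhile_le PySem.Chars.isspace l
              omega
            simp [PySem.Chars.lstrip, List.dropWhile_cons, ha]
        have hr' : PySem.Chars.rstrip (cur ++ pend ++ [x]) = cur ++ pend ++ [x] := by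
          simp only [PySem.Chars.rstrip, List.reverse_append, List.reverse_cons,
            List.reverse_nil, List.nil_append, List.cons_append]
          simp [List.dropWhile_cons, hxf]
        rw [List.foldl_cons, hstep,
          ih items (cur ++ pend ++ [x]) [] hl' hr' (by simp) (by simp)]
        rw [List.splitOnP_cons, if_neg (by simp [hx])]
        congr 1
        rw [List.modifyHead_modifyHead]
        cases hrest : List.splitOnP (· == ',') rest with
        | nil => simp
        | cons hd tl => simp [Function.comp]

-- B as the same flatMap
theorem pv_B_eq (values : List String) :
    split_csv_values_alt values
      = values.flatMap (fun v =>
          (((List.splitOnP (· == ',') v.toList).map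
              (fun c => String.ofList (PySem.Chars.strip c))).filter
            (fun s => decide (s ≠ "")))) := by
  have hstep : ∀ (acc : List String) (v : String),
      (let st := v.toList.foldl pvScanStep (acc, [], [])
       if st.2.1 ≠ [] then st.1 ++ [String.ofList st.2.1] else st.1)
      = acc ++ (((List.splitOnP (· == ',') v.toList).map
            (fun c => String.ofList (PySem.Chars.strip c))).filter
          (fun s => decide (s ≠ ""))) := by
    intro acc v
    rw [pv_scan v.toList acc [] [] rfl rfl (by simp) (fun _ => rfl)]
    simp [pv_modifyHead_id]
  suffices h : ∀ (acc : List String),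
      List.foldl (fun items value =>
        let st := value.toList.foldl pvScanStep (items, [], [])
        if st.2.1 ≠ [] then st.1 ++ [String.ofList st.2.1] else st.1) acc values
      = acc ++ values.flatMap (fun v =>
          (((List.splitOnP (· == ',') v.toList).map
              (fun c => String.ofList (PySem.Chars.strip c))).filter
            (fun s => decide (s ≠ "")))) by
    have := h []
    simpa [split_csv_values_alt] using this
  induction values with
  | nil => intro acc; simp
  | cons v vs ih =>
    intro acc
    rw [List.foldl_cons, hstep, ih, List.flatMap_cons, List.append_assoc]

-- ===== VERDICT (by name: the statement is the Claim_ definition above) =====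
theorem split_csv_values_spec : Claim_equal_split_csv_values := by
  intro values _
  unfold Spec_split_csv_values
  rw [pv_A_eq, pv_B_eq]
  apply List.flatMap_congr
  intro v _
  rw [pv_split_comma, List.map_map]
  congr 1
  apply List.map_congr_left
  intro c _
  simp [PySem.Str.strip, Function.comp]
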